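-- pv_equiv track=rewrite | github.com/apieum/dspy | dspy/teleprompt/gepa.py | _are_adversarial
-- ===== SOURCE A (Python) =====
-- def _are_adversarial(inst1: str, inst2: str) -> bool:
--     """Check if instructions are adversarial (conflicting guidance)."""
--     adversarial_pairs = [
--         (['brief', 'concise', 'short'], ['detailed', 'comprehensive', 'thorough']),
--         (['simple', 'basic', 'straightforward'], ['complex', 'sophisticated', 'advanced']),
--         (['fast', 'quick', 'rapid'], ['careful', 'methodical', 'deliberate']),
--         (['direct', 'immediate'], ['step-by-step', 'gradual', 'incremental'])
--     ]
--
--     inst1_lower = inst1.lower()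
--     inst2_lower = inst2.lower()
--
--     for group1, group2 in adversarial_pairs:
--         has_group1_in_inst1 = any(kw in inst1_lower for kw in group1)
--         has_group2_in_inst2 = any(kw in inst2_lower for kw in group2)
--         has_group1_in_inst2 = any(kw in inst2_lower for kw in group1)
--         has_group2_in_inst1 = any(kw in inst1_lower for kw in group2)
--
--         # Adversarial if instructions contain conflicting directives
--         if ((has_group1_in_inst1 and has_group2_in_inst2) or
--             (has_group1_in_inst2 and has_group2_in_inst1)):
--             return True
--
--     return False
-- ===== SOURCE B (Python) =====
-- def _are_adversarial(inst1: str, inst2: str) -> bool: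
--     """Check if instructions are adversarial (conflicting guidance)."""
--     # flat keyword -> bit table: pair i, group1 -> bit 2i, group2 -> bit 2i+1
--     keyword_bits = {
--         'brief': 0, 'concise': 0, 'short': 0,
--         'detailed': 1, 'comprehensive': 1, 'thorough': 1,
--         'simple': 2, 'basic': 2, 'straightforward': 2,
--         'complex': 3, 'sophisticated': 3, 'advanced': 3,
--         'fast': 4, 'quick': 4, 'rapid': 4,
--         'careful': 5, 'methodical': 5, 'deliberate': 5,
--         'direct': 6, 'immediate': 6,
--         'step-by-step': 7, 'gradual': 7, 'incremental': 7,
--     }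
--
--     def mask(inst):
--         text = inst.lower()
--         m = 0
--         for kw, bit in keyword_bits.items():
--             if kw in text:
--                 m |= 1 << bit
--         return m
--
--     m1, m2 = mask(inst1), mask(inst2)
--     # conflict = some pair where one instruction hits group1 and the other group2:
--     # swap m2's even/odd bits and intersect with m1
--     swapped = ((m2 >> 1) & 0x55) | ((m2 & 0x55) << 1)
--     return (m1 & swapped) != 0
-- ===== Notes on version B (the rewrite author's own statement) =====
-- stated objective: alternative
-- what changed: B replaces A's per-pair loop with four interleaved any-tests by a flat keyword-to-bit table that encodes each instruction as an 8-bit conflict bitmask in one pass, then detects a conflict with a single bitwise even/odd-bit swap and intersection instead of any loop over the pairs.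
import Mathlib
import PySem

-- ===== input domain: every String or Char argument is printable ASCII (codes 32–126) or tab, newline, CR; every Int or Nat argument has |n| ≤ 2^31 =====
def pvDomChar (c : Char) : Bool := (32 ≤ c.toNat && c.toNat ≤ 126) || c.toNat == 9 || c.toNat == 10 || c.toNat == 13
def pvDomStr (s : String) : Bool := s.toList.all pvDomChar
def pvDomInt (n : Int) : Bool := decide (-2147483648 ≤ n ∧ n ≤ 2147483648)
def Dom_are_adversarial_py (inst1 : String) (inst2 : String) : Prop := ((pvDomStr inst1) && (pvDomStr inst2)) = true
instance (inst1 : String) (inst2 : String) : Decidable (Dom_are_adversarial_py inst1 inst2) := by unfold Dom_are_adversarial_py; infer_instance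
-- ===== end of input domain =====

-- B encodes each instruction as an 8-bit conflict bitmask via a flat keyword→bit table and detects
-- a conflict with one bitwise even/odd-bit swap and intersection, instead of A's loop over keyword
-- pairs with four interleaved any-tests (objective: alternative; same cost).

-- ===== PORT A =====
def pvPairsA : List (List String × List String) :=
  [ (["brief", "concise", "short"], ["detailed", "comprehensive", "thorough"]),
    (["simple", "basic", "straightforward"], ["complex", "sophisticated", "advanced"]),
    (["fast", "quick", "rapid"], ["careful", "methodical", "deliberate"]),
    (["direct", "immediate"], ["step-by-step", "gradual", "incremental"]) ]

-- A's for-loop with early 'return True' is List.any over the pair list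
def are_adversarial_py (inst1 : String) (inst2 : String) : Bool :=
  let inst1_lower := PySem.Str.lower inst1
  let inst2_lower := PySem.Str.lower inst2
  pvPairsA.any (fun p =>
    let has_group1_in_inst1 := p.1.any (fun kw => PySem.Str.isIn kw inst1_lower)
    let has_group2_in_inst2 := p.2.any (fun kw => PySem.Str.isIn kw inst2_lower)
    let has_group1_in_inst2 := p.1.any (fun kw => PySem.Str.isIn kw inst2_lower)
    let has_group2_in_inst1 := p.2.any (fun kw => PySem.Str.isIn kw inst1_lower)
    (has_group1_in_inst1 && has_group2_in_inst2) || (has_group1_in_inst2 && has_group2_in_inst1))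

-- ===== PORT B =====
-- B's flat dict keyword -> bit, an association list in insertion order
def pvKeywordBits : List (String × Nat) :=
  [ ("brief", 0), ("concise", 0), ("short", 0),
    ("detailed", 1), ("comprehensive", 1), ("thorough", 1),
    ("simple", 2), ("basic", 2), ("straightforward", 2),
    ("complex", 3), ("sophisticated", 3), ("advanced", 3),
    ("fast", 4), ("quick", 4), ("rapid", 4),
    ("careful", 5), ("methodical", 5), ("deliberate", 5),
    ("direct", 6), ("immediate", 6),
    ("step-by-step", 7), ("gradual", 7), ("incremental", 7) ]

-- mask(inst): OR of 1 << bit over the keywords present (all values are nonnegative, so Nat is exact)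
def pvMask (inst : String) : Nat :=
  let text := PySem.Str.lower inst
  pvKeywordBits.foldl (fun m kb => if PySem.Str.isIn kb.1 text then m ||| (1 <<< kb.2) else m) 0

def are_adversarial_py_alt (inst1 : String) (inst2 : String) : Bool :=
  let m1 := pvMask inst1
  let m2 := pvMask inst2
  let swapped := ((m2 >>> 1) &&& 85) ||| ((m2 &&& 85) <<< 1)
  decide ((m1 &&& swapped) ≠ 0)

-- ===== PRECONDITION & SPEC =====
def Spec_are_adversarial_py (inst1 : String) (inst2 : String) (out : Bool) : Prop := out = are_adversarial_py_alt inst1 inst2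
instance (inst1 : String) (inst2 : String) (out : Bool) : Decidable (Spec_are_adversarial_py inst1 inst2 out) := by unfold Spec_are_adversarial_py; infer_instance

-- ===== CLAIM (what is proved, stated in full; the proofs are below) =====
def Claim_equal_are_adversarial_py : Prop := ∀ (inst1 : String) (inst2 : String), Dom_are_adversarial_py inst1 inst2 → Spec_are_adversarial_py inst1 inst2 (are_adversarial_py inst1 inst2)

-- ===== LEMMAS AND PROOFS =====

-- the group-presence flag of an instruction (A's any-tests, one keyword group at a time)
def pvFlag (g : List String) (inst : String) : Bool :=
  g.any (fun kw => PySem.Str.isIn kw (PySem.Str.lower inst))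

-- the numeric value of a mask whose 8 bits are the given flags
def pvNatOfFlags (b0 b1 b2 b3 b4 b5 b6 b7 : Bool) : Nat :=
  (if b0 then 1 else 0) + (if b1 then 2 else 0) + (if b2 then 4 else 0) + (if b3 then 8 else 0) +
  (if b4 then 16 else 0) + (if b5 then 32 else 0) + (if b6 then 64 else 0) + (if b7 then 128 else 0)

theorem or_if_bit (m : Nat) (c : Bool) (b : Nat) :
    (if c then m ||| b else m) = m ||| (if c then b else 0) := by
  cases c <;> simp

theorem if_or_if (c d : Bool) (b : Nat) :
    (if c then b else 0) ||| (if d then b else 0) = if (c || d) then b else 0 := by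
  cases c <;> cases d <;> simp [Nat.or_self]

theorem or_if_or (m : Nat) (c d : Bool) (b : Nat) :
    (m ||| (if c then b else 0)) ||| (if d then b else 0) = m ||| (if (c || d) then b else 0) := by
  cases c <;> cases d <;> simp

-- B's mask is determined by the 8 group flags
set_option maxHeartbeats 1000000 in
theorem pvMask_char (inst : String) :
    pvMask inst =
      pvNatOfFlags (pvFlag ["brief", "concise", "short"] inst)
        (pvFlag ["detailed", "comprehensive", "thorough"] inst)
        (pvFlag ["simple", "basic", "straightforward"] inst)
        (pvFlag ["complex", "sophisticated", "advanced"] inst)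
        (pvFlag ["fast", "quick", "rapid"] inst)
        (pvFlag ["careful", "methodical", "deliberate"] inst)
        (pvFlag ["direct", "immediate"] inst)
        (pvFlag ["step-by-step", "gradual", "incremental"] inst) := by
  simp only [pvMask, pvKeywordBits, List.foldl, pvFlag, List.any_cons, List.any_nil,
    Bool.or_false, or_if_bit, or_if_or, if_or_if, Nat.zero_or, Bool.or_assoc]
  generalize (PySem.Str.isIn "brief" (PySem.Str.lower inst) || _) = b0
  generalize (PySem.Str.isIn "detailed" (PySem.Str.lower inst) || _) = b1
  generalize (PySem.Str.isIn "simple" (PySem.Str.lower inst) || _) = b2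
  generalize (PySem.Str.isIn "complex" (PySem.Str.lower inst) || _) = b3
  generalize (PySem.Str.isIn "fast" (PySem.Str.lower inst) || _) = b4
  generalize (PySem.Str.isIn "careful" (PySem.Str.lower inst) || _) = b5
  generalize (PySem.Str.isIn "direct" (PySem.Str.lower inst) || _) = b6
  generalize (PySem.Str.isIn "step-by-step" (PySem.Str.lower inst) || _) = b7
  revert b0 b1 b2 b3 b4 b5 b6 b7
  decide

-- the bitwise even/odd swap-and-intersect on flag-encoded masks equals A's pairwise condition
set_option maxHeartbeats 2000000 in
theorem pvBit_cross (a0 a1 a2 a3 a4 a5 a6 a7 b0 b1 b2 b3 b4 b5 b6 b7 : Bool) :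
    (decide ((pvNatOfFlags a0 a1 a2 a3 a4 a5 a6 a7 &&&
        (((pvNatOfFlags b0 b1 b2 b3 b4 b5 b6 b7 >>> 1) &&& 85) |||
         ((pvNatOfFlags b0 b1 b2 b3 b4 b5 b6 b7 &&& 85) <<< 1))) ≠ 0)) =
      ((a0 && b1 || a1 && b0) || (a2 && b3 || a3 && b2) ||
       (a4 && b5 || a5 && b4) || (a6 && b7 || a7 && b6)) := by
  revert a0 a1 a2 a3 a4 a5 a6 a7 b0 b1 b2 b3 b4 b5 b6 b7
  decide

-- ===== VERDICT (by name: the statement is the Claim_ definition above) =====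
set_option maxHeartbeats 1000000 in
theorem are_adversarial_py_spec : Claim_equal_are_adversarial_py := by
  intro inst1 inst2 _
  unfold Spec_are_adversarial_py are_adversarial_py are_adversarial_py_alt
  rw [pvMask_char inst1, pvMask_char inst2, pvBit_cross]
  simp only [pvPairsA, pvFlag, List.any_cons, List.any_nil, Bool.or_false]
  ac_rfl
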